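-- pv_equiv track=rewrite | github.com/sebabrzovic/Multiscale-Entropy-Analysis | algorithm/calculo_entropia.py | separar_Cod
-- ===== SOURCE A (Python) =====
-- def binarizar(decimal):
--     binario = ''
--     while decimal // 2 != 0:
--         binario = str(decimal % 2) + binario
--         decimal = decimal // 2
--     return str(decimal) + binario
--
-- def separar_Cod(B1,B2,n): #B1, B2 binarios
--     n_bin=binarizar(n)
--     B=B1+B2+str(n_bin)
--     L=len(B)
--     part_0=[str(B[0])] #guardamos el primer elemento
--     k=0
--     while k+1 <= (L-1): #empezamos a recorrer B
--       k=k+1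
--       elem=''+str(B[k])
--
--       while elem in part_0: #buscamos elemento que no haya
--                             #sido agregado antes
--           if k==(L-1):
--             part_0.append(elem)
--             return part_0
--
--           else:
--             k=k+1
--             elem=elem+str(B[k])
--
--       part_0.append(elem)
--
--     return part_0 #retorna la codificación separada de tal
-- ===== SOURCE B (Python) =====
-- def separar_Cod(B1, B2, n):  # B1, B2 binarios
--     # Trie-based LZ78-style parse: descend per character instead of growing a
--     # fragment and testing list membership.
--     B = B1 + B2 + bin(n)[2:]
--     piezas = [B[0]]
--     root = {'kids': {}, 'phrase': ''}
--     root['kids'][B[0]] = {'kids': {}, 'phrase': B[0]}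
--     node = root
--     for c in B[1:]:
--         child = node['kids'].get(c)
--         if child is not None:
--             node = child
--         else:
--             new_phrase = node['phrase'] + c
--             node['kids'][c] = {'kids': {}, 'phrase': new_phrase}
--             piezas.append(new_phrase)
--             node = root
--     if node['phrase'] != '':
--         piezas.append(node['phrase'])
--     return piezas
-- ===== Notes on version B (the rewrite author's own statement) =====
-- stated objective: faster
-- what changed: B replaces A's grow-a-fragment-and-scan-the-phrase-list parse by an LZ78 trie: it descends one child pointer per character and inserts a leaf when the child is missing, so the repeated fragment/list membership scans disappear.
import Mathlib
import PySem

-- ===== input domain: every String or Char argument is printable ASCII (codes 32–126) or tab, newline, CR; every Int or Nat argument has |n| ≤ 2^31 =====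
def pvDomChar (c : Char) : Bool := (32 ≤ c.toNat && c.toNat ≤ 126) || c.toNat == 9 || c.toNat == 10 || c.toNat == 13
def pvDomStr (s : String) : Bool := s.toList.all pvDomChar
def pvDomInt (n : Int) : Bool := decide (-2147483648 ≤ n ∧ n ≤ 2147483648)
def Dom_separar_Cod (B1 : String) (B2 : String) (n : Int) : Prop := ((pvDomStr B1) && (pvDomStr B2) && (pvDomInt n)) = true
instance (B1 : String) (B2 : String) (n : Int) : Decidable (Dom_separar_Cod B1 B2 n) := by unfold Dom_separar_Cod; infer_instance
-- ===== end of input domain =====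

-- B replaces A's grow-a-fragment-and-test-list-membership parse by a trie walk (faster in a timing run)
-- (per-character child descent); return values agree on Pre_ (0 ≤ n).

-- ===== PORT A =====
-- binarizar's while loop, fuel = decimal.toNat (enough for every 0 ≤ decimal;
-- for decimal < 0 the Python loop never terminates — excluded by Pre_).
def binA : Nat → Int → List Char → List Char
  | 0, decimal, binario => (PySem.Int.toStr decimal).toList ++ binario
  | f + 1, decimal, binario =>
    if PySem.Int.floordiv decimal 2 ≠ 0 then
      binA f (PySem.Int.floordiv decimal 2)
        ((PySem.Int.toStr (PySem.Int.mod decimal 2)).toList ++ binario)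
    else (PySem.Int.toStr decimal).toList ++ binario

-- A's two nested while loops over the suffix of B after index k
-- (k == L-1 ⟺ the remaining suffix is empty); strings kept as List Char.
mutual
def innerA (part : List (List Char)) (elem : List Char) (rest : List Char) :
    List (List Char) :=
  if elem ∈ part then
    match rest with
    | [] => part ++ [elem]          -- k == L-1: append and return
    | c :: rest' => innerA part (elem ++ [c]) rest'
  else
    outerA (part ++ [elem]) rest
termination_by (rest.length, 1)
def outerA (part : List (List Char)) (rest : List Char) : List (List Char) :=
  match rest with
  | [] => part
  | c :: rest' => innerA part [c] rest'
termination_by (rest.length, 0)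
end

def separar_Cod (B1 : String) (B2 : String) (n : Int) : List String :=
  match B1.toList ++ B2.toList ++ binA n.toNat n [] with
  | [] => []                         -- unreachable: binarizar's result is nonempty
  | c :: rest => (outerA [[c]] rest).map String.ofList

-- ===== PORT B =====
-- a trie node: children (an association list Char → child) and its full phrase
mutual
inductive PTrie where
  | mk : PKids → List Char → PTrie
inductive PKids where
  | nil : PKids
  | cons : Char → PTrie → PKids → PKids
end

def PTrie.kids : PTrie → PKids
  | .mk k _ => k

def PTrie.phrase : PTrie → List Char
  | .mk _ p => p

-- node['kids'].get(c)
def kidsFind : PKids → Char → Option PTrie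
  | .nil, _ => none
  | .cons d u r, c => if d = c then some u else kidsFind r c

-- node['kids'][c] = t  (dict assignment: overwrite in place, else append)
def kidsSet : PKids → Char → PTrie → PKids
  | .nil, c, t => .cons c t .nil
  | .cons d u r, c, t => if d = c then .cons d t r else .cons d u (kidsSet r c t)

-- functional counterpart of mutating the current node's dict inside root:
-- walk down root along the current node's phrase and add the new leaf there
def insertT (t : PTrie) : List Char → Char → PTrie
  | [], c => .mk (kidsSet t.kids c (.mk .nil (t.phrase ++ [c]))) t.phrase
  | d :: p, c =>
    match kidsFind t.kids d with
    | some u => .mk (kidsSet t.kids d (insertT u p c)) t.phrase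
    | none => t                      -- unreachable: the path exists

-- the for-loop over B[1:] with state (root, node, piezas), then the final flush
def loopB (root : PTrie) (cur : PTrie) (out : List (List Char)) :
    List Char → List (List Char)
  | [] => if cur.phrase = [] then out else out ++ [cur.phrase]
  | c :: rest =>
    match kidsFind cur.kids c with
    | some t => loopB root t out rest
    | none =>
      loopB (insertT root cur.phrase c) (insertT root cur.phrase c)
        (out ++ [cur.phrase ++ [c]]) rest

-- bin(n)[2:] for n ≥ 0, ported by hand (fuel n+1 is enough; msb first)
def binNatAux : Nat → Nat → List Char
  | 0, _ => []                       -- fuel exhausted: unreachable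
  | f + 1, m =>
    if m < 2 then [Char.ofNat (48 + m)]
    else binNatAux f (m / 2) ++ [Char.ofNat (48 + m % 2)]

-- root = {} ; root[B[0]] = leaf(B[0])
def rootInit (c : Char) : PTrie :=
  PTrie.mk (kidsSet PKids.nil c (PTrie.mk PKids.nil [c])) []

def separar_Cod_alt (B1 : String) (B2 : String) (n : Int) : List String :=
  match B1.toList ++ B2.toList ++ binNatAux (n.toNat + 1) n.toNat with
  | [] => []
  | c :: rest => (loopB (rootInit c) (rootInit c) [[c]] rest).map String.ofList

-- ===== PRECONDITION & SPEC =====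
-- Pre_ excludes n < 0: there A's binarizar loops forever (never returns).
def Pre_separar_Cod (B1 : String) (B2 : String) (n : Int) : Prop := 0 ≤ n
instance (B1 : String) (B2 : String) (n : Int) : Decidable (Pre_separar_Cod B1 B2 n) := by
  unfold Pre_separar_Cod; infer_instance

def pvWitness_separar_Cod : String × String × Int := ("0110", "10", 5)

def Spec_separar_Cod (B1 : String) (B2 : String) (n : Int) (out : List String) : Prop :=
  out = separar_Cod_alt B1 B2 n
instance (B1 : String) (B2 : String) (n : Int) (out : List String) :
    Decidable (Spec_separar_Cod B1 B2 n out) := by unfold Spec_separar_Cod; infer_instance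

-- ===== CLAIM (what is proved, stated in full; the proofs are below) =====
def Claim_equal_separar_Cod : Prop :=
  ∀ (B1 : String) (B2 : String) (n : Int), Dom_separar_Cod B1 B2 n →
    Pre_separar_Cod B1 B2 n → Spec_separar_Cod B1 B2 n (separar_Cod B1 B2 n)


-- ===== LEMMAS AND PROOFS =====

-- navigate a trie along a path
def nav : PTrie → List Char → Option PTrie
  | t, [] => some t
  | t, c :: p =>
    match kidsFind t.kids c with
    | some u => nav u p
    | none => none

-- every reachable node stores exactly its path (relative to the prefix pre)
def WFat (t : PTrie) (pre : List Char) : Prop :=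
  ∀ q u, nav t q = some u → u.phrase = pre ++ q

-- the loop invariant: part's members are exactly the nonempty trie paths
def ParseInv (part : List (List Char)) (root : PTrie) : Prop :=
  (∀ s : List Char, s ∈ part ↔ (s ≠ [] ∧ (nav root s).isSome)) ∧ WFat root []

theorem kidsFind_kidsSet : ∀ (k : PKids) (c c' : Char) (t : PTrie),
    kidsFind (kidsSet k c t) c' = if c = c' then some t else kidsFind k c'
  | .nil, c, c', t => by simp [kidsSet, kidsFind]
  | .cons d u r, c, c', t => by
    by_cases hdc : d = c
    · subst hdc
      by_cases hcc : d = c' <;> simp [kidsSet, kidsFind, hcc]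
    · by_cases hdc' : d = c'
      · subst hdc'
        simp [kidsSet, kidsFind, hdc, Ne.symm hdc]
      · simp [kidsSet, kidsFind, hdc, hdc', kidsFind_kidsSet r]

theorem nav_snoc (p : List Char) (t : PTrie) (c : Char) :
    nav t (p ++ [c]) = (nav t p).bind (fun u => kidsFind u.kids c) := by
  induction p generalizing t with
  | nil =>
    simp only [List.nil_append, nav, Option.bind_some]
    cases hf : kidsFind t.kids c <;> simp [nav, hf]
  | cons d p' ih =>
    simp only [List.cons_append, nav]
    cases hf : kidsFind t.kids d <;> simp [hf, ih]

theorem insertT_phrase (t : PTrie) (p : List Char) (c : Char) :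
    (insertT t p c).phrase = t.phrase := by
  cases p with
  | nil => simp [insertT, PTrie.phrase, PTrie.kids]
  | cons d p' =>
    simp only [insertT]
    cases kidsFind t.kids d <;> simp [PTrie.phrase]

theorem nav_insert_isSome : ∀ (p : List Char) (root cur : PTrie) (c : Char),
    nav root p = some cur → kidsFind cur.kids c = none →
    ∀ q, (nav (insertT root p c) q).isSome ↔ ((nav root q).isSome ∨ q = p ++ [c])
  | [], root, cur, c, hnav, hmiss => by
    have hrc : root = cur := by simpa [nav] using hnav
    subst hrc
    obtain ⟨rk, rp⟩ := root
    simp only [PTrie.kids] at hmiss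
    intro q
    cases q with
    | nil => simp [nav]
    | cons e q' =>
      simp only [insertT, nav, PTrie.kids, kidsFind_kidsSet]
      by_cases hce : c = e
      · subst hce
        simp only [if_pos rfl, hmiss]
        cases q' with
        | nil => simp [nav]
        | cons f q'' => simp [nav, PTrie.kids, kidsFind]
      · simp only [if_neg hce]
        have hne : e :: q' ≠ [c] := by
          intro h; exact hce (by injection h with h1 _; exact h1.symm)
        cases hf : kidsFind rk e <;> simp [hf, nav, hne]
  | d :: p', root, cur, c, hnav, hmiss => by
    obtain ⟨rk, rp⟩ := root
    cases hfd : kidsFind rk d with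
    | none => simp [nav, PTrie.kids, hfd] at hnav
    | some u =>
      have hnav' : nav u p' = some cur := by simpa [nav, PTrie.kids, hfd] using hnav
      intro q
      cases q with
      | nil => simp [insertT, PTrie.kids, hfd, nav]
      | cons e q' =>
        simp only [insertT, PTrie.kids, hfd, nav, kidsFind_kidsSet]
        by_cases hde : d = e
        · subst hde
          simp only [if_true, hfd]
          rw [nav_insert_isSome p' u cur c hnav' hmiss q']
          constructor
          · rintro (h | h)
            · exact Or.inl h
            · exact Or.inr (by simp [h])
          · rintro (h | h)
            · exact Or.inl h
            · exact Or.inr (by simpa using h)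
        · have hne : e :: q' ≠ d :: (p' ++ [c]) := by
            simp only [ne_eq, List.cons.injEq, not_and]
            intro h; exact absurd h.symm hde
          simp only [if_neg hde]
          cases hf : kidsFind rk e <;> simp [hf, hne]

theorem WFat_insert : ∀ (p pre : List Char) (root cur : PTrie) (c : Char),
    WFat root pre → nav root p = some cur → kidsFind cur.kids c = none →
    WFat (insertT root p c) pre
  | [], pre, root, cur, c, hwf, hnav, hmiss => by
    have hrc : root = cur := by simpa [nav] using hnav
    subst hrc
    obtain ⟨rk, rp⟩ := root
    have hrp : rp = pre := by simpa [PTrie.phrase] using hwf [] ⟨rk, rp⟩ (by simp [nav])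
    intro q u hq
    cases q with
    | nil =>
      have hu : u = PTrie.mk (kidsSet rk c (PTrie.mk .nil (rp ++ [c]))) rp := by
        simpa [insertT, nav, PTrie.kids, PTrie.phrase] using hq.symm
      subst hu; simpa [PTrie.phrase] using hrp
    | cons e q' =>
      simp only [insertT, nav, PTrie.kids, PTrie.phrase, kidsFind_kidsSet] at hq
      by_cases hce : c = e
      · subst hce
        simp only [if_true, eq_self_iff_true, reduceIte] at hq
        cases q' with
        | nil =>
          have hu : u = PTrie.mk .nil (rp ++ [c]) := by simpa [nav] using hq.symm
          subst hu; simp [PTrie.phrase, hrp]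
        | cons f q'' => simp [nav, PTrie.kids, kidsFind] at hq
      · simp only [if_neg hce] at hq
        cases hf : kidsFind rk e with
        | none => rw [hf] at hq; simp at hq
        | some w =>
          rw [hf] at hq
          exact hwf (e :: q') u (by simp [nav, PTrie.kids, hf, hq])
  | d :: p', pre, root, cur, c, hwf, hnav, hmiss => by
    obtain ⟨rk, rp⟩ := root
    cases hfd : kidsFind rk d with
    | none => simp [nav, PTrie.kids, hfd] at hnav
    | some u =>
      have hnav' : nav u p' = some cur := by simpa [nav, PTrie.kids, hfd] using hnav
      have hwfu : WFat u (pre ++ [d]) := by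
        intro q w hw
        have := hwf (d :: q) w (by simp [nav, PTrie.kids, hfd, hw])
        simpa using this
      have hrec := WFat_insert p' (pre ++ [d]) u cur c hwfu hnav' hmiss
      intro q w hq
      simp only [insertT, PTrie.kids, hfd, PTrie.phrase] at hq
      cases q with
      | nil =>
        have hw : w = PTrie.mk (kidsSet rk d (insertT u p' c)) rp := by
          simpa [nav] using hq.symm
        subst hw
        simpa [PTrie.phrase] using hwf [] ⟨rk, rp⟩ (by simp [nav])
      | cons e q' =>
        simp only [nav, PTrie.kids, kidsFind_kidsSet] at hq
        by_cases hde : d = e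
        · subst hde
          simp only [if_pos rfl] at hq
          have := hrec q' w hq
          simpa using this
        · simp only [if_neg hde] at hq
          cases hf : kidsFind rk e with
          | none => rw [hf] at hq; simp at hq
          | some v =>
            rw [hf] at hq
            exact hwf (e :: q') w (by simp [nav, PTrie.kids, hf, hq])

theorem ParseInv_insert (part : List (List Char)) (root cur : PTrie) (p : List Char)
    (c : Char) (hInv : ParseInv part root) (hnav : nav root p = some cur)
    (hmiss : kidsFind cur.kids c = none) :
    ParseInv (part ++ [p ++ [c]]) (insertT root p c) := by
  obtain ⟨hmem, hwf⟩ := hInv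
  constructor
  · intro s
    rw [List.mem_append, List.mem_singleton, hmem s]
    constructor
    · rintro (⟨hne, hs⟩ | rfl)
      · exact ⟨hne, (nav_insert_isSome p root cur c hnav hmiss s).mpr (Or.inl hs)⟩
      · exact ⟨by simp, (nav_insert_isSome p root cur c hnav hmiss _).mpr (Or.inr rfl)⟩
    · rintro ⟨hne, hs⟩
      rcases (nav_insert_isSome p root cur c hnav hmiss s).mp hs with h | h
      · exact Or.inl ⟨hne, h⟩
      · exact Or.inr h
  · exact WFat_insert p [] root cur c hwf hnav hmiss

theorem root_phrase_nil (root : PTrie) (h : WFat root []) : root.phrase = [] := by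
  simpa using h [] root (by simp [nav])

theorem main_loop : ∀ (rest : List Char) (part : List (List Char))
    (root cur : PTrie) (p : List Char) (c : Char),
    ParseInv part root → nav root p = some cur →
    innerA part (p ++ [c]) rest = loopB root cur part (c :: rest)
  | rest, part, root, cur, p, c, hInv, hnav => by
    have hmem : (p ++ [c]) ∈ part ↔ (kidsFind cur.kids c).isSome := by
      rw [hInv.1, nav_snoc, hnav]
      simp
    have hcurph : cur.phrase = p := by simpa using hInv.2 p cur hnav
    rw [innerA.eq_def, loopB]
    cases hk : kidsFind cur.kids c with
    | some t =>
      have helem : (p ++ [c]) ∈ part := hmem.mpr (by simp [hk])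
      have hnavt : nav root (p ++ [c]) = some t := by rw [nav_snoc, hnav]; simpa
      rw [if_pos helem]
      cases rest with
      | nil =>
        have ht : t.phrase = p ++ [c] := hInv.2 (p ++ [c]) t hnavt
        simp [loopB, ht]
      | cons c' rest' =>
        have := main_loop rest' part root t (p ++ [c]) c' hInv hnavt
        simpa using this
    | none =>
      have helem : (p ++ [c]) ∉ part := fun h => by simp [hk] at hmem; exact hmem h
      rw [if_neg helem, hcurph]
      have hInv' : ParseInv (part ++ [p ++ [c]]) (insertT root p c) :=
        ParseInv_insert part root cur p c hInv hnav hk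
      cases rest with
      | nil =>
        have hph : (insertT root p c).phrase = [] := by
          rw [insertT_phrase]; exact root_phrase_nil root hInv.2
        simp [outerA, loopB, hph]
      | cons c' rest' =>
        rw [outerA]
        have := main_loop rest' (part ++ [p ++ [c]]) (insertT root p c)
          (insertT root p c) [] c' hInv' (by simp [nav])
        simpa using this
termination_by rest => (rest.length, 0)

theorem outer_eq (rest : List Char) (part : List (List Char)) (root : PTrie)
    (hInv : ParseInv part root) : outerA part rest = loopB root root part rest := by
  cases rest with
  | nil =>
    rw [outerA, loopB]
    simp [root_phrase_nil root hInv.2]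
  | cons c rest' =>
    rw [outerA]
    have := main_loop rest' part root root [] c hInv (by simp [nav])
    simpa using this

theorem ParseInv_init (c : Char) : ParseInv [[c]] (rootInit c) := by
  constructor
  · intro s
    cases s with
    | nil => simp [nav]
    | cons e s' =>
      simp only [rootInit, kidsSet, nav, PTrie.kids, kidsFind]
      by_cases hce : c = e
      · subst hce
        simp only [if_pos rfl]
        cases s' with
        | nil => simp [nav]
        | cons f s'' => simp [nav, PTrie.kids, kidsFind]
      · have : e :: s' ≠ [c] := by
          intro h; exact hce (by injection h with h1 _; exact h1.symm)
        simp [hce, this]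
  · intro q u hq
    cases q with
    | nil =>
      have : u = rootInit c := by simpa [nav] using hq.symm
      subst this; simp [rootInit, PTrie.phrase]
    | cons e q' =>
      simp only [rootInit, kidsSet, nav, PTrie.kids, kidsFind] at hq
      by_cases hce : c = e
      · subst hce
        simp only [if_pos rfl] at hq
        cases q' with
        | nil =>
          have : u = PTrie.mk .nil [c] := by simpa [nav] using hq.symm
          subst this; simp [PTrie.phrase]
        | cons f q'' => simp [nav, PTrie.kids, kidsFind] at hq
      · simp [hce] at hq

theorem binA_eq : ∀ (f : Nat) (d : Int) (acc : List Char) (g : Nat),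
    0 ≤ d → d.toNat ≤ f → d.toNat < g → binA f d acc = binNatAux g d.toNat ++ acc
  | 0, d, acc, g, h0, hf, hg => by
    have hd : d = 0 := by omega
    subst hd
    obtain ⟨g', rfl⟩ : ∃ g', g = g' + 1 := ⟨g - 1, by omega⟩
    have h1 : (PySem.Int.toStr 0).toList = [Char.ofNat 48] := by decide
    simp [binA, binNatAux, h1]
  | f + 1, d, acc, g, h0, hf, hg => by
    obtain ⟨g', rfl⟩ : ∃ g', g = g' + 1 := ⟨g - 1, by omega⟩
    have hfd : PySem.Int.floordiv d 2 = d / 2 :=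
      PySem.Int.floordiv_eq_ediv_of_pos (by norm_num)
    have hmd : PySem.Int.mod d 2 = d % 2 :=
      PySem.Int.mod_eq_emod_of_pos (by norm_num)
    by_cases h2 : d < 2
    · have hdd : d / 2 = 0 := by omega
      rw [binA, hfd, hdd, if_neg (by simp)]
      rcases (by omega : d = 0 ∨ d = 1) with rfl | rfl
      · have h1 : (PySem.Int.toStr 0).toList = [Char.ofNat 48] := by decide
        simp [binNatAux, h1]
      · have h1 : (PySem.Int.toStr 1).toList = [Char.ofNat 49] := by decide
        simp [binNatAux, h1]
    · have hne : PySem.Int.floordiv d 2 ≠ 0 := by rw [hfd]; omega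
      rw [binA, if_pos hne, hfd, hmd]
      rw [binA_eq f (d / 2) ((PySem.Int.toStr (d % 2)).toList ++ acc) g'
        (by omega) (by omega) (by omega)]
      have hnt : ¬ d.toNat < 2 := by omega
      have hdt : (d / 2).toNat = d.toNat / 2 := by omega
      have hdig : (PySem.Int.toStr (d % 2)).toList = [Char.ofNat (48 + d.toNat % 2)] := by
        rcases (by omega : d % 2 = 0 ∨ d % 2 = 1) with h | h
        · have h' : d.toNat % 2 = 0 := by omega
          rw [h, h']; decide
        · have h' : d.toNat % 2 = 1 := by omega
          rw [h, h']; decide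
      rw [hdig, hdt, binNatAux, if_neg hnt, List.append_assoc]

-- ===== VERDICT (by name: the statement is the Claim_ definition above) =====
theorem separar_Cod_spec : Claim_equal_separar_Cod := by
  intro B1 B2 n _hDom hPre
  show separar_Cod B1 B2 n = separar_Cod_alt B1 B2 n
  rw [separar_Cod, separar_Cod_alt,
    binA_eq n.toNat n [] (n.toNat + 1) hPre le_rfl (Nat.lt_succ_self _), List.append_nil]
  cases hL : B1.toList ++ B2.toList ++ binNatAux (n.toNat + 1) n.toNat with
  | nil => rfl
  | cons c rest =>
    simp only []
    rw [outer_eq rest [[c]] (rootInit c) (ParseInv_init c)]
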